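-- pv_equiv track=rewrite | github.com/rlagusgh0223/Algorithm | 240609/프로그래머스, N으로 표현.py | solution
-- ===== SOURCE A (Python) =====
-- def solution(N, number):
--     dp = []
--     # N의 최솟값이 8보다 크면 -1 리턴
--     for i in range(1, 9):
--         # N을 i번 반복해서 만들 수 있는 수의 집합
--         now = set([int(str(N)*i)])
--         # i=1  => dp[1]
--         # i=2  => dp[0]과 dp[1], 또는 dp[1]과dp[0]의 조합
--         # i=3  => dp[0]과 dp[2], dp[1]과 dp[1], dp[2]와 dp[0]의 조합
--         # 각 dp에는 이전 계산한 수들의 집합이 있다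
--         for j in range(i-1):
--             for x in dp[j]:
--                 for y in dp[-j-1]:
--                     now.add(x+y)
--                     now.add(x-y)
--                     now.add(x*y)
--                     if y > 0:
--                         now.add(x//y)
--         # 이번 수의 조합에 목표하는 수가 있다면 i번의 수로 만들 수 있으므로 리턴
--         if number in now:
--             return i
--         # 아니면 다음 연산을 위해 dp에 이번 조합 입력
--         dp.append(now)
--     return -1
-- ===== SOURCE B (Python) =====
-- def solution(N, number):
--     memo = {}
--
--     def make(i):
--         # set of values expressible with exactly i copies of N
--         if i in memo:
--             return memo[i]
--         s = {int(str(N) * i)}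
--         for j in range(1, i // 2 + 1):
--             left, right = make(j), make(i - j)
--             for x in left:
--                 for y in right:
--                     s.add(x + y)
--                     s.add(x * y)
--                     s.add(x - y)
--                     s.add(y - x)
--                     if y > 0:
--                         s.add(x // y)
--                     if x > 0:
--                         s.add(y // x)
--         memo[i] = s
--         return s
--
--     for i in range(1, 9):
--         if number in make(i):
--             return i
--     return -1
-- ===== Notes on version B (the rewrite author's own statement) =====
-- stated objective: alternative
-- what changed: B replaces A's bottom-up dp list with a top-down memoized make(i) that recurses only over the splits j <= i-j and symmetrises the operation set (adding y-x and y//x alongside x+y, x*y, x-y, x//y), returning the first i in 1..8 whose set contains the target.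
-- outside the precondition, e.g. on solution(-3, 5): A raises ValueError, B raises ValueError
import Mathlib
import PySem

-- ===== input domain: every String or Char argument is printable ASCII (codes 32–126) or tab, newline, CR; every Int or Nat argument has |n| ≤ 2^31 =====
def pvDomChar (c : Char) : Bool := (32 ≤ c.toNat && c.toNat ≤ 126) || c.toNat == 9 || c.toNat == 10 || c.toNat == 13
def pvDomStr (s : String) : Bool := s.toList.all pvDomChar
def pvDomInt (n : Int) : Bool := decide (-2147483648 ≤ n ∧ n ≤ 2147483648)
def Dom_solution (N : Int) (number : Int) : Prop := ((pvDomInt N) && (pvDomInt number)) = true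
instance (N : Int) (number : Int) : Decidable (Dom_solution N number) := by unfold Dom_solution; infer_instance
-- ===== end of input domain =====

-- B changes the decomposition: top-down recursive make(i) over only the splits j ≤ i-j with a symmetrised
-- operation set, instead of A's bottom-up dp list over all splits; same return value (objective: alternative).

-- ===== PORT A =====
-- Python's `set` is ported as Std.HashSet (a hash set, like CPython's): both programs consume set
-- elements only order-independently (building further sets and membership tests), so hash order
-- cannot affect the returned Int.
-- int(str(N)*i); i ≥ 1 here, i.toNat is exact; the .getD 0 is only reached where Python raises (outside Pre_)
def repNum (N : Int) (i : Int) : Int :=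
  (PySem.Int.ofChars? (List.flatten (List.replicate i.toNat (PySem.Int.toChars N)))).getD 0

-- body of A's innermost loop: the four now.add(...) on one pair (x, y)
def aStep (x : Int) (now : Std.HashSet Int) (y : Int) : Std.HashSet Int :=
  let n1 := now.insert (x + y)
  let n2 := n1.insert (x - y)
  let n3 := n2.insert (x * y)
  if 0 < y then n3.insert (PySem.Int.floordiv x y) else n3

-- A's two inner for-loops over dp[j] and dp[-j-1]
def aComb (now : Std.HashSet Int) (xs ys : List Int) : Std.HashSet Int :=
  xs.foldl (fun now x => ys.foldl (aStep x) now) now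

-- the body of A's outer iteration: build `now` for copy-count i from dp
def aBuild (N : Int) (dp : List (Std.HashSet Int)) (i : Int) : Std.HashSet Int :=
  (PySem.List.pyRange 0 (i - 1)).foldl
    (fun now j => aComb now (PySem.List.pyGetD dp j ∅).toList (PySem.List.pyGetD dp (-j - 1) ∅).toList)
    (Std.HashSet.ofList [repNum N i])

-- A's `for i in range(1, 9)` with early return and dp.append
def aLoop (N : Int) (number : Int) (dp : List (Std.HashSet Int)) : List Int → Int
  | [] => -1
  | i :: rest =>
    let now := aBuild N dp i
    if now.contains number then i
    else aLoop N number (dp ++ [now]) rest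

def solution (N : Int) (number : Int) : Int :=
  aLoop N number [] (PySem.List.pyRange 1 9)

-- ===== PORT B =====
def repNumAlt (N : Int) (i : Nat) : Int :=
  (PySem.Int.ofChars? (List.flatten (List.replicate i (PySem.Int.toChars N)))).getD 0

-- body of B's innermost loop: the six s.add(...) on one pair (x, y)
def bStep (x : Int) (s : Std.HashSet Int) (y : Int) : Std.HashSet Int :=
  let s1 := s.insert (x + y)
  let s2 := s1.insert (x * y)
  let s3 := s2.insert (x - y)
  let s4 := s3.insert (y - x)
  let s5 := if 0 < y then s4.insert (PySem.Int.floordiv x y) else s4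
  if 0 < x then s5.insert (PySem.Int.floordiv y x) else s5

-- B's two inner for-loops over make(j) and make(i-j)
def bPair (s : Std.HashSet Int) (xs ys : List Int) : Std.HashSet Int :=
  xs.foldl (fun s x => ys.foldl (bStep x) s) s

-- B's memoized make(i): values expressible with exactly i copies of N (memoisation is an evaluation
-- detail of Source B; the recursion structure is the same)
def makeAlt (N : Int) (i : Nat) : Std.HashSet Int :=
  (List.range' 1 (i / 2)).attach.foldl
    (fun s j => bPair s (makeAlt N j.1).toList (makeAlt N (i - j.1)).toList)
    (Std.HashSet.ofList [repNumAlt N i])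
termination_by i
decreasing_by
  · have h := List.mem_range'_1.mp j.2; omega
  · have h := List.mem_range'_1.mp j.2; omega

-- B's `for i in range(1, 9)` with early return
def bLoop (N : Int) (number : Int) : List Nat → Int
  | [] => -1
  | i :: rest =>
    if (makeAlt N i).contains number then (i : Int)
    else bLoop N number rest

def solution_alt (N : Int) (number : Int) : Int :=
  bLoop N number (List.range' 1 8)

-- ===== PRECONDITION & SPEC =====
-- Pre_ excludes exactly the inputs on which A raises: for N < 0 with number ≠ N, int(str(N)*2) raises
-- ValueError ("-2-2"); B raises there too, so nothing is claimed about those inputs.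
def Pre_solution (N : Int) (number : Int) : Prop := 0 ≤ N ∨ number = N
instance (N : Int) (number : Int) : Decidable (Pre_solution N number) := by
  unfold Pre_solution; infer_instance

def pvWitness_solution : Int × Int := (2, 10)

def Spec_solution (N : Int) (number : Int) (out : Int) : Prop := out = solution_alt N number
instance (N : Int) (number : Int) (out : Int) : Decidable (Spec_solution N number out) := by
  unfold Spec_solution; infer_instance

-- ===== CLAIM (what is proved, stated in full; the proofs are below) =====
def Claim_equal_solution : Prop := ∀ (N : Int) (number : Int), Dom_solution N number → Pre_solution N number → Spec_solution N number (solution N number)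

-- ===== LEMMAS AND PROOFS =====

-- the four values A derives from a pair (x, y)
def Aop (x y v : Int) : Prop :=
  v = x + y ∨ v = x - y ∨ v = x * y ∨ (0 < y ∧ v = PySem.Int.floordiv x y)

-- the six values B derives from a pair (x, y)
def Bop (x y v : Int) : Prop :=
  v = x + y ∨ v = x * y ∨ v = x - y ∨ v = y - x ∨
    (0 < y ∧ v = PySem.Int.floordiv x y) ∨ (0 < x ∧ v = PySem.Int.floordiv y x)

-- the common mathematical characterisation: v is expressible with exactly i copies of N
inductive PvE (N : Int) : Nat → Int → Prop where
  | base {i : Nat} (h : 1 ≤ i) : PvE N i (repNumAlt N i)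
  | add {j k : Nat} {x y : Int} : PvE N j x → PvE N k y → PvE N (j + k) (x + y)
  | sub {j k : Nat} {x y : Int} : PvE N j x → PvE N k y → PvE N (j + k) (x - y)
  | mul {j k : Nat} {x y : Int} : PvE N j x → PvE N k y → PvE N (j + k) (x * y)
  | fdiv {j k : Nat} {x y : Int} : PvE N j x → PvE N k y → 0 < y →
      PvE N (j + k) (PySem.Int.floordiv x y)

theorem PvE_pos {N : Int} {i : Nat} {v : Int} (h : PvE N i v) : 1 ≤ i := by
  induction h <;> omega

theorem bop_iff (x y v : Int) : Bop x y v ↔ Aop x y v ∨ Aop y x v := by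
  unfold Bop Aop
  constructor
  · rintro (h | h | h | h | h | h)
    · exact Or.inl (Or.inl h)
    · exact Or.inl (Or.inr (Or.inr (Or.inl h)))
    · exact Or.inl (Or.inr (Or.inl h))
    · exact Or.inr (Or.inr (Or.inl h))
    · exact Or.inl (Or.inr (Or.inr (Or.inr h)))
    · exact Or.inr (Or.inr (Or.inr (Or.inr h)))
  · rintro ((h | h | h | h) | (h | h | h | h))
    · exact Or.inl h
    · exact Or.inr (Or.inr (Or.inl h))
    · exact Or.inr (Or.inl h)
    · exact Or.inr (Or.inr (Or.inr (Or.inr (Or.inl h))))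
    · exact Or.inl (by omega)
    · exact Or.inr (Or.inr (Or.inr (Or.inl h)))
    · exact Or.inr (Or.inl (by rw [Int.mul_comm] at h; exact h))
    · exact Or.inr (Or.inr (Or.inr (Or.inr (Or.inr h))))

theorem mem_foldl {β : Type} (f : Std.HashSet Int → β → Std.HashSet Int) (P : β → Int → Prop)
    (hf : ∀ s b v, v ∈ f s b ↔ v ∈ s ∨ P b v) (l : List β) (s : Std.HashSet Int) (v : Int) :
    v ∈ l.foldl f s ↔ v ∈ s ∨ ∃ b ∈ l, P b v := by
  induction l generalizing s with
  | nil => simp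
  | cons b l ih => simp [List.foldl_cons, ih, hf]; tauto

theorem mem_aStep (x : Int) (s : Std.HashSet Int) (y v : Int) :
    v ∈ aStep x s y ↔ v ∈ s ∨ Aop x y v := by
  unfold aStep Aop
  split_ifs with h <;> simp [Std.HashSet.mem_insert] <;> tauto

theorem mem_bStep (x : Int) (s : Std.HashSet Int) (y v : Int) :
    v ∈ bStep x s y ↔ v ∈ s ∨ Bop x y v := by
  unfold bStep Bop
  split_ifs <;> simp [Std.HashSet.mem_insert] <;> tauto

theorem mem_aComb (now : Std.HashSet Int) (xs ys : List Int) (v : Int) :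
    v ∈ aComb now xs ys ↔ v ∈ now ∨ ∃ x ∈ xs, ∃ y ∈ ys, Aop x y v := by
  unfold aComb
  exact mem_foldl _ (fun x v => ∃ y ∈ ys, Aop x y v)
    (fun s x v => mem_foldl (aStep x) (fun y v => Aop x y v) (mem_aStep x) ys s v) xs now v

theorem mem_bPair (s : Std.HashSet Int) (xs ys : List Int) (v : Int) :
    v ∈ bPair s xs ys ↔ v ∈ s ∨ ∃ x ∈ xs, ∃ y ∈ ys, Bop x y v := by
  unfold bPair
  exact mem_foldl _ (fun x v => ∃ y ∈ ys, Bop x y v)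
    (fun s x v => mem_foldl (bStep x) (fun y v => Bop x y v) (mem_bStep x) ys s v) xs s v

theorem expr_of_aop {N : Int} {a b : Nat} {x y v : Int}
    (hx : PvE N a x) (hy : PvE N b y) (hop : Aop x y v) : PvE N (a + b) v := by
  rcases hop with h | h | h | ⟨hy0, h⟩ <;> subst h
  · exact PvE.add hx hy
  · exact PvE.sub hx hy
  · exact PvE.mul hx hy
  · exact PvE.fdiv hx hy hy0

theorem pyGetD_neg {α : Type} (dp : List α) (d : α) (m : Nat) (hm : m < dp.length) :
    PySem.List.pyGetD dp (-(m : Int) - 1) d = dp.getD (dp.length - 1 - m) d := by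
  have h1 : -((dp.length : Nat) : Int) ≤ -(m : Int) - 1 := by omega
  simp [PySem.List.pyGetD, PySem.List.pyGet?, PySem.List.pyIdx?, h1]
  have h4 : ¬ (1 ≤ -(m : Int)) := by omega
  simp [h4]
  have h2 : (1 + (m : Int)).toNat = m + 1 := by omega
  rw [h2]
  rw [List.getElem?_eq_getElem (show dp.length - (m+1) < dp.length by omega),
      List.getElem?_eq_getElem (show dp.length - 1 - m < dp.length by omega)]
  simp only [Option.getD_some]
  congr 1
  omega

theorem pyGetD_pos {α : Type} (dp : List α) (d : α) (m : Nat) :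
    PySem.List.pyGetD dp ((m : Int)) d = dp.getD m d := by
  rw [PySem.List.pyGetD_of_nonneg dp d (by omega)]
  simp

theorem rep_eq (N : Int) (k : Nat) : repNum N ((k : Int) + 1) = repNumAlt N (k + 1) := by
  unfold repNum repNumAlt
  have h : ((k : Int) + 1).toNat = k + 1 := by omega
  rw [h]

theorem Bop_symm {x y v : Int} (h : Bop x y v) : Bop y x v := by
  rw [bop_iff] at h ⊢
  tauto

-- the membership characterisation of B's make(i): base value or a symmetrised pair from some split j ≤ i-j
theorem makeAlt_char (N : Int) (i : Nat) (v : Int) :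
    v ∈ makeAlt N i ↔ v = repNumAlt N i ∨
      ∃ j ∈ List.range' 1 (i / 2), ∃ x ∈ makeAlt N j, ∃ y ∈ makeAlt N (i - j), Bop x y v := by
  rw [makeAlt]
  rw [mem_foldl _ (fun (b : {j // j ∈ List.range' 1 (i / 2)}) v =>
        ∃ x ∈ (makeAlt N b.1).toList, ∃ y ∈ (makeAlt N (i - b.1)).toList, Bop x y v)
      (fun s b v => mem_bPair s (makeAlt N b.1).toList (makeAlt N (i - b.1)).toList v)]
  simp [Std.HashSet.mem_toList]
  rw [eq_comm]

theorem pair_mem_makeAlt {N : Int} {a b : Nat} {x y v : Int}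
    (hx : x ∈ makeAlt N a) (hy : y ∈ makeAlt N b) (ha : 1 ≤ a) (hb : 1 ≤ b)
    (hop : Bop x y v) : v ∈ makeAlt N (a + b) := by
  rw [makeAlt_char]
  right
  by_cases hab : a ≤ b
  · refine ⟨a, by simp [List.mem_range'_1]; omega, x, hx, y, ?_, hop⟩
    have h : a + b - a = b := by omega
    rw [h]; exact hy
  · refine ⟨b, by simp [List.mem_range'_1]; omega, y, hy, x, ?_, Bop_symm hop⟩
    have h : a + b - b = a := by omega
    rw [h]; exact hx

theorem makeAlt_of_expr {N : Int} {i : Nat} {v : Int} (h : PvE N i v) : v ∈ makeAlt N i := by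
  induction h with
  | base hi => rw [makeAlt_char]; exact Or.inl rfl
  | add hx hy ihx ihy =>
      exact pair_mem_makeAlt ihx ihy (PvE_pos hx) (PvE_pos hy) (Or.inl rfl)
  | sub hx hy ihx ihy =>
      exact pair_mem_makeAlt ihx ihy (PvE_pos hx) (PvE_pos hy)
        (Or.inr (Or.inr (Or.inl rfl)))
  | mul hx hy ihx ihy =>
      exact pair_mem_makeAlt ihx ihy (PvE_pos hx) (PvE_pos hy) (Or.inr (Or.inl rfl))
  | fdiv hx hy hy0 ihx ihy =>
      exact pair_mem_makeAlt ihx ihy (PvE_pos hx) (PvE_pos hy)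
        (Or.inr (Or.inr (Or.inr (Or.inr (Or.inl ⟨hy0, rfl⟩)))))

theorem mem_makeAlt (N : Int) : ∀ (i : Nat), 1 ≤ i → ∀ (v : Int),
    v ∈ makeAlt N i ↔ PvE N i v := by
  intro i
  induction i using Nat.strong_induction_on with
  | _ i ih =>
    intro hi v
    constructor
    · intro hv
      rw [makeAlt_char] at hv
      rcases hv with rfl | ⟨j, hj, x, hx, y, hy, hop⟩
      · exact PvE.base hi
      · rw [List.mem_range'_1] at hj
        have hj1 : 1 ≤ j := hj.1
        have hj2 : j ≤ i / 2 := by omega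
        have hji : j < i := by omega
        have hij1 : 1 ≤ i - j := by omega
        have hiji : i - j < i := by omega
        have ex : PvE N j x := (ih j hji hj1 x).mp hx
        have ey : PvE N (i - j) y := (ih (i - j) hiji hij1 y).mp hy
        rcases (bop_iff x y v).mp hop with hop | hop
        · have := expr_of_aop ex ey hop
          rwa [show j + (i - j) = i by omega] at this
        · have := expr_of_aop ey ex hop
          rwa [show (i - j) + j = i by omega] at this
    · exact makeAlt_of_expr

theorem mem_aBuild (N : Int) (k : Nat) (dp : List (Std.HashSet Int))
    (hlen : dp.length = k)
    (hdp : ∀ m < k, ∀ w : Int, w ∈ dp.getD m ∅ ↔ PvE N (m + 1) w) (v : Int) :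
    v ∈ aBuild N dp ((k : Int) + 1) ↔ PvE N (k + 1) v := by
  unfold aBuild
  rw [show (k : Int) + 1 - 1 = (k : Int) by omega]
  rw [mem_foldl _ (fun (j : Int) v =>
        ∃ x ∈ (PySem.List.pyGetD dp j ∅).toList, ∃ y ∈ (PySem.List.pyGetD dp (-j - 1) ∅).toList, Aop x y v)
      (fun s j v => mem_aComb s _ _ v)]
  rw [rep_eq]
  constructor
  · rintro (hv | ⟨j, hj, x, hx, y, hy, hop⟩)
    · simp at hv
      rw [← hv]
      exact PvE.base (by omega)
    · rw [PySem.List.mem_pyRange_one] at hj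
      obtain ⟨m, rfl⟩ : ∃ m : Nat, j = (m : Int) := ⟨j.toNat, by omega⟩
      have hm : m < k := by omega
      rw [pyGetD_pos] at hx
      rw [pyGetD_neg dp ∅ m (by omega)] at hy
      rw [hlen] at hy
      rw [Std.HashSet.mem_toList] at hx hy
      have ex : PvE N (m + 1) x := (hdp m hm x).mp hx
      have ey : PvE N (k - 1 - m + 1) y := (hdp (k - 1 - m) (by omega) y).mp hy
      have := expr_of_aop ex ey hop
      rwa [show (m + 1) + (k - 1 - m + 1) = k + 1 by omega] at this
  · intro h
    have pair : ∀ (a b : Nat) (x y : Int), PvE N a x → PvE N b y → a + b = k + 1 →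
        Aop x y v →
        (v ∈ Std.HashSet.ofList [repNumAlt N (k + 1)] ∨
          ∃ j ∈ PySem.List.pyRange 0 (k : Int),
            ∃ x ∈ (PySem.List.pyGetD dp j ∅).toList, ∃ y ∈ (PySem.List.pyGetD dp (-j - 1) ∅).toList,
              Aop x y v) := by
      intro a b x y hx hy hab hop
      have ha := PvE_pos hx
      have hb := PvE_pos hy
      right
      refine ⟨((a - 1 : Nat) : Int), ?_, x, ?_, y, ?_, hop⟩
      · rw [PySem.List.mem_pyRange_one]; omega
      · rw [pyGetD_pos, Std.HashSet.mem_toList]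
        exact (hdp (a - 1) (by omega) x).mpr (by rwa [show a - 1 + 1 = a by omega])
      · rw [pyGetD_neg dp ∅ (a - 1) (by omega), hlen, Std.HashSet.mem_toList]
        exact (hdp (k - 1 - (a - 1)) (by omega) y).mpr
          (by rwa [show k - 1 - (a - 1) + 1 = b by omega])
    generalize hik : k + 1 = i at h
    cases h with
    | base hi => exact Or.inl (by simp [← hik])
    | add hx hy => rw [← hik]; exact pair _ _ _ _ hx hy (by omega) (Or.inl rfl)
    | sub hx hy => rw [← hik]; exact pair _ _ _ _ hx hy (by omega) (Or.inr (Or.inl rfl))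
    | mul hx hy =>
        rw [← hik]; exact pair _ _ _ _ hx hy (by omega) (Or.inr (Or.inr (Or.inl rfl)))
    | fdiv hx hy hy0 =>
        rw [← hik]; exact pair _ _ _ _ hx hy (by omega) (Or.inr (Or.inr (Or.inr ⟨hy0, rfl⟩)))

theorem contains_congr (s t : Std.HashSet Int) (x : Int) (h : x ∈ s ↔ x ∈ t) :
    s.contains x = t.contains x := by
  have hs := @Std.HashSet.contains_iff_mem _ _ _ s x
  have ht := @Std.HashSet.contains_iff_mem _ _ _ t x
  by_cases hx : x ∈ t
  · rw [ht.mpr hx, hs.mpr (h.mpr hx)]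
  · have h1 : s.contains x ≠ true := fun hc => hx (h.mp (hs.mp hc))
    have h2 : t.contains x ≠ true := fun hc => hx (ht.mp hc)
    simp only [Bool.not_eq_true] at h1 h2
    rw [h1, h2]

theorem loop_eq (N number : Int) : ∀ (n k : Nat) (dp : List (Std.HashSet Int)),
    k + n = 8 → dp.length = k →
    (∀ m < k, ∀ w : Int, w ∈ dp.getD m ∅ ↔ PvE N (m + 1) w) →
    aLoop N number dp (PySem.List.pyRange ((k : Int) + 1) 9) =
      bLoop N number (List.range' (k + 1) n) := by
  intro n
  induction n with
  | zero =>
      intro k dp hk hlen hdp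
      have hk8 : k = 8 := by omega
      subst hk8
      rw [show ((8 : Nat) : Int) + 1 = 9 by norm_num]
      rw [show PySem.List.pyRange 9 9 = [] from rfl]
      rfl
  | succ n ihn =>
      intro k dp hk hlen hdp
      rw [PySem.List.pyRange_one_cons (by omega)]
      rw [List.range'_succ]
      rw [show aLoop N number dp (((k : Int) + 1) :: PySem.List.pyRange ((k : Int) + 1 + 1) 9) =
            (if (aBuild N dp ((k : Int) + 1)).contains number then ((k : Int) + 1)
             else aLoop N number (dp ++ [aBuild N dp ((k : Int) + 1)])
                    (PySem.List.pyRange ((k : Int) + 1 + 1) 9)) from rfl]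
      rw [show bLoop N number ((k + 1) :: List.range' (k + 1 + 1) n) =
            (if (makeAlt N (k + 1)).contains number then ((k + 1 : Nat) : Int)
             else bLoop N number (List.range' (k + 1 + 1) n)) from rfl]
      have hiff : (number ∈ aBuild N dp ((k : Int) + 1)) ↔ number ∈ makeAlt N (k + 1) :=
        (mem_aBuild N k dp hlen hdp number).trans (mem_makeAlt N (k + 1) (by omega) number).symm
      rw [contains_congr _ _ _ hiff]
      by_cases hc : (makeAlt N (k + 1)).contains number = true
      · simp only [hc, if_pos]
        push_cast
        ring
      · rw [Bool.not_eq_true] at hc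
        simp only [hc, Bool.false_eq_true, if_false]
        have hlen' : (dp ++ [aBuild N dp ((k : Int) + 1)]).length = k + 1 := by
          simp [hlen]
        have hdp' : ∀ m < k + 1, ∀ w : Int,
            w ∈ (dp ++ [aBuild N dp ((k : Int) + 1)]).getD m ∅ ↔ PvE N (m + 1) w := by
          intro m hm w
          by_cases hmk : m < k
          · have heq : (dp ++ [aBuild N dp ((k : Int) + 1)]).getD m ∅ = dp.getD m ∅ := by
              rw [List.getD_eq_getElem?_getD, List.getD_eq_getElem?_getD,
                  List.getElem?_append_left (by omega)]
            rw [heq]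
            exact hdp m hmk w
          · have hmk' : m = k := by omega
            rw [hmk']
            have heq : (dp ++ [aBuild N dp ((k : Int) + 1)]).getD k ∅ =
                aBuild N dp ((k : Int) + 1) := by
              rw [List.getD_eq_getElem?_getD, List.getElem?_append_right (by omega), hlen]
              simp
            rw [heq]
            exact mem_aBuild N k dp hlen hdp w
        have := ihn (k + 1) (dp ++ [aBuild N dp ((k : Int) + 1)]) (by omega) hlen' hdp'
        push_cast at this
        exact this

-- ===== VERDICT (by name: the statement is the Claim_ definition above) =====
theorem solution_spec : Claim_equal_solution := by
  intro N number _ _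
  unfold Spec_solution solution solution_alt
  have h := loop_eq N number 8 0 [] rfl rfl (by intro m hm; omega)
  simpa using h
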